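-- pv_equiv track=rewrite | github.com/B0ss-M/XPM-version-2 | xpm_utils.py | calculate_key_ranges
-- ===== SOURCE A (Python) =====
-- def calculate_key_ranges(mappings):
--     """Calculate low/high note ranges based on root notes."""
--     if not mappings:
--         return []
--
--     sorted_maps = sorted(mappings, key=lambda m: m.get("root_note", 60))
--     for i, current in enumerate(sorted_maps):
--         if i == 0:
--             current["low_note"] = 0
--         else:
--             prev = sorted_maps[i - 1]
--             midpoint = (prev["root_note"] + current["root_note"]) // 2
--             current["low_note"] = midpoint + 1
--
--         if i == len(sorted_maps) - 1:
--             current["high_note"] = 127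
--         else:
--             nxt = sorted_maps[i + 1]
--             midpoint = (current["root_note"] + nxt["root_note"]) // 2
--             current["high_note"] = midpoint
--
--     return sorted_maps
-- ===== SOURCE B (Python) =====
-- def calculate_key_ranges(mappings):
--     """Calculate low/high note ranges based on root notes."""
--     if not mappings:
--         return []
--
--     def assign(low, rest):
--         # recursive pass carrying the lower bound of the current zone
--         head, *tail = rest
--         head["low_note"] = low
--         if not tail:
--             head["high_note"] = 127
--             return [head]
--         mid = (head["root_note"] + tail[0]["root_note"]) // 2
--         head["high_note"] = mid
--         return [head] + assign(mid + 1, tail)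
--
--     return assign(0, sorted(mappings, key=lambda m: m.get("root_note", 60)))
-- ===== Notes on version B (the rewrite author's own statement) =====
-- stated objective: alternative
-- what changed: A iterates the sorted list by index with first/last branches, re-reading both neighbour dicts to compute each element's low and high; B is a recursive single pass that carries the current zone's lower bound as an accumulator, looks only at the next element's root to split, and never indexes or looks back.
import Mathlib
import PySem

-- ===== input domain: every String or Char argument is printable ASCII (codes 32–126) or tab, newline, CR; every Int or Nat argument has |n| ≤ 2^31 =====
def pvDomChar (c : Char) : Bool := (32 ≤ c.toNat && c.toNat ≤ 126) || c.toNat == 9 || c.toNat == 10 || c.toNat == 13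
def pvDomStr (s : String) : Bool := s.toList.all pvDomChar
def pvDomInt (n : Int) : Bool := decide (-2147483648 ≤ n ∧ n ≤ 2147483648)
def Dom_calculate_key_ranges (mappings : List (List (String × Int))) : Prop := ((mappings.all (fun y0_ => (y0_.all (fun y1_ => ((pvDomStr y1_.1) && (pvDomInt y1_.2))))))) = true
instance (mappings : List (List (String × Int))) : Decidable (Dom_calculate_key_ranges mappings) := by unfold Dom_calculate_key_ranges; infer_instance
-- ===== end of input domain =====

-- B replaces A's indexed pass (first/last branches reading both neighbour dicts) by a recursive
-- single pass carrying the current zone's lower bound: an alternative decomposition of the same cost.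
-- Both Pythons mutate the input dicts in place; the equivalence proved here is about the RETURN value.

-- m["root_note"] as both Pythons read it (the default 0 is never reached inside Pre_)
def pvRoot (m : PySem.Dict String Int) : Int := (PySem.Dict.get? m "root_note").getD 0

-- ===== PORT A =====
-- one iteration of A's `for i, current in enumerate(sorted_maps)` loop (n = len(sorted_maps))
def pvKrStep (n : Nat) (s : List (PySem.Dict String Int)) (i : Nat) : List (PySem.Dict String Int) :=
  let current := s.getD i (PySem.Dict.mk [])
  let current :=
    if i = 0 then current.insert "low_note" 0
    else
      let prev := s.getD (i - 1) (PySem.Dict.mk [])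
      let midpoint := PySem.Int.floordiv (pvRoot prev + pvRoot current) 2
      current.insert "low_note" (midpoint + 1)
  let current :=
    if i = n - 1 then current.insert "high_note" 127
    else
      let nxt := s.getD (i + 1) (PySem.Dict.mk [])
      let midpoint := PySem.Int.floordiv (pvRoot current + pvRoot nxt) 2
      current.insert "high_note" midpoint
  s.set i current

def calculate_key_ranges (mappings : List (List (String × Int))) : List (List (String × Int)) :=
  if mappings = [] then []
  else
    let sorted_maps := PySem.List.sorted (mappings.map PySem.Dict.mk)
      (fun m => PySem.Dict.getD m "root_note" 60)
    let n := sorted_maps.length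
    (((List.range n).foldl (pvKrStep n) sorted_maps).map PySem.Dict.items)

-- ===== PORT B =====
-- B's recursive helper `assign(low, rest)`; rest is nonempty whenever Python calls it
def pvAssign (low : Int) : List (PySem.Dict String Int) → List (PySem.Dict String Int)
  | [] => []          -- unreachable: Python's `head, *tail = rest` always gets a nonempty rest
  | head :: tail =>
    let head := head.insert "low_note" low
    match tail with
    | [] => [head.insert "high_note" 127]
    | nxt :: _ =>
      let mid := PySem.Int.floordiv (pvRoot head + pvRoot nxt) 2
      (head.insert "high_note" mid) :: pvAssign (mid + 1) tail

def calculate_key_ranges_alt (mappings : List (List (String × Int))) : List (List (String × Int)) :=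
  if mappings = [] then []
  else
    (pvAssign 0 (PySem.List.sorted (mappings.map PySem.Dict.mk)
      (fun m => PySem.Dict.getD m "root_note" 60))).map PySem.Dict.items

-- ===== PRECONDITION & SPEC =====
-- Pre_ excludes exactly the inputs where both Pythons raise KeyError: two or more mappings of
-- which some dict lacks "root_note" (with 0 or 1 mappings no root_note is ever read).
def Pre_calculate_key_ranges (mappings : List (List (String × Int))) : Prop :=
  mappings.length ≤ 1 ∨ ∀ m ∈ mappings, "root_note" ∈ m.map Prod.fst
instance (mappings : List (List (String × Int))) : Decidable (Pre_calculate_key_ranges mappings) := by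
  unfold Pre_calculate_key_ranges; infer_instance

def pvWitness_calculate_key_ranges : (List (List (String × Int))) :=
  [[("root_note", 72), ("x", 1)], [("root_note", 60)]]

def Spec_calculate_key_ranges (mappings : List (List (String × Int))) (out : List (List (String × Int))) : Prop := out = calculate_key_ranges_alt mappings
instance (mappings : List (List (String × Int))) (out : List (List (String × Int))) : Decidable (Spec_calculate_key_ranges mappings out) := by unfold Spec_calculate_key_ranges; infer_instance

-- ===== CLAIM (what is proved, stated in full; the proofs are below) =====
def Claim_equal_calculate_key_ranges : Prop := ∀ (mappings : List (List (String × Int))), Dom_calculate_key_ranges mappings → Pre_calculate_key_ranges mappings → Spec_calculate_key_ranges mappings (calculate_key_ranges mappings)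

-- ===== LEMMAS AND PROOFS =====

-- the low/high values A assigns at position i of the sorted list t
def pvLowV (t : List (PySem.Dict String Int)) (i : Nat) : Int :=
  if i = 0 then 0
  else PySem.Int.floordiv (pvRoot (t.getD (i - 1) (PySem.Dict.mk [])) + pvRoot (t.getD i (PySem.Dict.mk []))) 2 + 1

def pvHighV (t : List (PySem.Dict String Int)) (i : Nat) : Int :=
  if i = t.length - 1 then 127
  else PySem.Int.floordiv (pvRoot (t.getD i (PySem.Dict.mk [])) + pvRoot (t.getD (i + 1) (PySem.Dict.mk []))) 2

def pvOut (t : List (PySem.Dict String Int)) (i : Nat) : PySem.Dict String Int :=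
  ((t.getD i (PySem.Dict.mk [])).insert "low_note" (pvLowV t i)).insert "high_note" (pvHighV t i)

theorem pvRoot_insert (m : PySem.Dict String Int) (k : String) (v : Int) (h : k ≠ "root_note") :
    pvRoot (m.insert k v) = pvRoot m := by
  unfold pvRoot
  rw [PySem.Dict.get?_insert_of_ne _ _ (Ne.symm h)]

theorem pvRoot_out (t : List (PySem.Dict String Int)) (i : Nat) :
    pvRoot (pvOut t i) = pvRoot (t.getD i (PySem.Dict.mk [])) := by
  unfold pvOut
  rw [pvRoot_insert _ _ _ (by decide), pvRoot_insert _ _ _ (by decide)]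

-- invariant of A's loop: after k steps the first k entries carry their final low/high values
theorem pvA_inv (t : List (PySem.Dict String Int)) (k : Nat) (hk : k ≤ t.length) :
    (List.range k).foldl (pvKrStep t.length) t = (List.range k).map (pvOut t) ++ t.drop k := by
  induction k with
  | zero => simp
  | succ k ih =>
    have hk' : k < t.length := hk
    rw [List.range_succ, List.foldl_append, List.foldl_cons, List.foldl_nil, ih (le_of_lt hk')]
    set s := (List.range k).map (pvOut t) ++ t.drop k with hs
    have hMlen : ((List.range k).map (pvOut t)).length = k := by simp
    have hat : ∀ j, k ≤ j → s.getD j (PySem.Dict.mk []) = t.getD j (PySem.Dict.mk []) := by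
      intro j hj
      rw [hs]
      have : j = ((List.range k).map (pvOut t)).length + (j - k) := by omega
      rw [this]
      simp [List.getD_eq_getElem?_getD, List.getElem?_append_right, List.getElem?_drop]
    have hbefore : ∀ j, j < k → s.getD j (PySem.Dict.mk []) = pvOut t j := by
      intro j hj
      rw [hs]
      have hj' : j < ((List.range k).map (pvOut t)).length := by omega
      rw [List.getD_eq_getElem?_getD, List.getElem?_append_left hj']
      simp [hj]
    have hcur : s.getD k (PySem.Dict.mk []) = t.getD k (PySem.Dict.mk []) := hat k le_rfl
    have hstep : pvKrStep t.length s k = s.set k (pvOut t k) := by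
      unfold pvKrStep
      dsimp only
      rw [hcur]
      have hlow :
          (if k = 0 then (t.getD k (PySem.Dict.mk [])).insert "low_note" 0
           else
             (t.getD k (PySem.Dict.mk [])).insert "low_note"
               (PySem.Int.floordiv (pvRoot (s.getD (k - 1) (PySem.Dict.mk [])) + pvRoot (t.getD k (PySem.Dict.mk []))) 2 + 1))
          = (t.getD k (PySem.Dict.mk [])).insert "low_note" (pvLowV t k) := by
        by_cases h0 : k = 0
        · simp [h0, pvLowV]
        · rw [if_neg h0]
          rw [hbefore (k - 1) (by omega), pvRoot_out]
          simp [pvLowV, h0]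
      rw [hlow]
      by_cases hlast : k = t.length - 1
      · rw [if_pos hlast]
        have : (127 : Int) = pvHighV t k := by simp [pvHighV, hlast]
        rw [this]; rfl
      · rw [if_neg hlast]
        rw [hat (k + 1) (by omega)]
        rw [pvRoot_insert _ _ _ (by decide)]
        have : PySem.Int.floordiv (pvRoot (t.getD k (PySem.Dict.mk [])) + pvRoot (t.getD (k + 1) (PySem.Dict.mk []))) 2 = pvHighV t k := by
          simp [pvHighV, hlast]
        rw [this]; rfl
    rw [hstep, hs]
    have : ((List.range k).map (pvOut t) ++ t.drop k).set k (pvOut t k)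
        = (List.range k).map (pvOut t) ++ (t.drop k).set 0 (pvOut t k) := by
      conv_lhs => rw [show k = ((List.range k).map (pvOut t)).length from hMlen.symm]
      simp
    rw [this, List.drop_eq_getElem_cons hk', List.set_cons_zero]
    simp

-- B's recursion, started at position k with the correct lower bound, finishes the tail exactly as A does
theorem pvB_char (t : List (PySem.Dict String Int)) (k : Nat) (hk : k < t.length) :
    pvAssign (pvLowV t k) (t.drop k) = (List.range' k (t.length - k)).map (pvOut t) := by
  have hmeas : t.length - k ≠ 0 := by omega
  induction hn : t.length - k generalizing k with
  | zero => omega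
  | succ d ih =>
    rw [List.drop_eq_getElem_cons hk]
    by_cases hlast : k = t.length - 1
    · have hd0 : d = 0 := by omega
      have hdropnil : t.drop (k + 1) = [] := by
        apply List.drop_eq_nil_of_le; omega
      rw [hdropnil]
      unfold pvAssign
      simp only [hd0]
      have hh : pvHighV t k = 127 := by simp [pvHighV, hlast]
      simp [List.range'_succ, pvOut, hh, List.getElem?_eq_getElem hk]
    · have hk1 : k + 1 < t.length := by omega
      have hdrop : t.drop (k + 1) = t[k + 1] :: t.drop (k + 2) := List.drop_eq_getElem_cons hk1
      rw [hdrop]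
      unfold pvAssign
      dsimp only
      rw [pvRoot_insert _ _ _ (by decide)]
      have hroot : pvRoot t[k] = pvRoot (t.getD k (PySem.Dict.mk [])) := by
        rw [List.getD_eq_getElem?_getD, List.getElem?_eq_getElem hk]; rfl
      have hroot1 : pvRoot t[k + 1] = pvRoot (t.getD (k + 1) (PySem.Dict.mk [])) := by
        rw [List.getD_eq_getElem?_getD, List.getElem?_eq_getElem hk1]; rfl
      have hmid : PySem.Int.floordiv (pvRoot t[k] + pvRoot t[k + 1]) 2 = pvHighV t k := by
        rw [hroot, hroot1]; simp [pvHighV, hlast]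
      have hnextlow : pvHighV t k + 1 = pvLowV t (k + 1) := by
        simp [pvHighV, pvLowV, hlast]
      have hrec : pvAssign (PySem.Int.floordiv (pvRoot t[k] + pvRoot t[k + 1]) 2 + 1) (t[k + 1] :: t.drop (k + 2))
          = (List.range' (k + 1) d).map (pvOut t) := by
        rw [hmid, hnextlow, ← hdrop]
        exact ih (k + 1) hk1 (by omega) (by omega)
      rw [hrec, List.range'_succ, List.map_cons]
      congr 1
      rw [hmid]
      simp [pvOut, pvLowV, pvHighV, hlast, List.getD_eq_getElem?_getD, List.getElem?_eq_getElem hk]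

theorem main_eq (mappings : List (List (String × Int))) :
    calculate_key_ranges mappings = calculate_key_ranges_alt mappings := by
  unfold calculate_key_ranges calculate_key_ranges_alt
  by_cases h : mappings = []
  · simp [h]
  · rw [if_neg h, if_neg h]
    dsimp only
    set t := PySem.List.sorted (mappings.map PySem.Dict.mk)
      (fun m => PySem.Dict.getD m "root_note" 60) with hts
    have ht : t ≠ [] := by
      rw [hts]
      simp [PySem.List.sorted_eq_nil_iff]
      exact h
    have htl : 0 < t.length := List.length_pos_of_ne_nil ht
    rw [pvA_inv t t.length le_rfl, List.drop_length, List.append_nil]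
    have h0 : pvAssign 0 t = (List.range' 0 t.length).map (pvOut t) := by
      have := pvB_char t 0 htl
      simpa [pvLowV] using this
    rw [h0, ← List.range_eq_range', List.map_map]

-- ===== VERDICT (by name: the statement is the Claim_ definition above) =====
theorem calculate_key_ranges_spec : Claim_equal_calculate_key_ranges := by
  intro mappings _ _
  unfold Spec_calculate_key_ranges
  exact main_eq mappings
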